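-- pv_equiv track=rewrite | github.com/ljia2/leetcode.py | solutions/bfs/1017.Convert.to.Base.-2.py | bfs
-- ===== SOURCE A (Python) =====
-- def bfs(N):
--     if N % 2 == 0:
--         q = [("0", 0)]
--     else:
--         q = [("1", 1)]
--
--     while q:
--         size = len(q)
--         while size > 0:
--             # POP AS a QUEUE!!!!
--             numstr, num = q.pop(0)
--             size -= 1
--
--             if num == N:
--                 return numstr
--
--             for d in [0, 1]:
--                 level = len(numstr)
--
--                 new_num = ((-2)**level + num) if d == 1 else num
--                 new_numstr = str(d) + numstr
--
--                 if new_num > N: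
--                     continue
--                 q.append((new_numstr, new_num))
--     return None
-- ===== SOURCE B (Python) =====
-- def bfs(N):
--     if N == 0:
--         return "0"
--     digits = []
--     n = N
--     while n != 0:
--         r = n % 2
--         digits.append(str(r))
--         n = (n - r) // -2
--     return "".join(reversed(digits))
-- ===== Notes on version B (the rewrite author's own statement) =====
-- stated objective: faster
-- what changed: replaces A's breadth-first search over all candidate digit strings (exponential in the number of digits) with the direct base -2 conversion by repeated remainder / division by -2
-- outside the precondition, e.g. on bfs(-3): A returns None, B returns '1101'; on bfs(-10): A returns None, B returns '1010'
import Mathlib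
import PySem

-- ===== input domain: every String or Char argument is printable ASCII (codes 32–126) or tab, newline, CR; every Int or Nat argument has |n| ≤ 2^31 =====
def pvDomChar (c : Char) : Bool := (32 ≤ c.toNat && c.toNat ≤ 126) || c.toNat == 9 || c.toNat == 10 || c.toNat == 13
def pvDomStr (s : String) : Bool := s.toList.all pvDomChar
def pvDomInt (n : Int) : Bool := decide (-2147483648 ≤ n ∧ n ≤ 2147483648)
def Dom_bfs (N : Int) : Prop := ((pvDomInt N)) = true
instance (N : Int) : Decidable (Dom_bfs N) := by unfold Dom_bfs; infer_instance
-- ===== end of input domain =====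

-- B replaces A's exponential breadth-first search over digit strings by the direct base -2
-- conversion (repeated remainder / division by -2); equality is proved on every input admitted by Pre_.

-- ===== PORT A =====
-- Python strings are modelled as List Char (the PySem.Chars convention) inside the search and
-- packed with String.ofList at the return points; 'str(d) + numstr' is PySem.Int.toChars d ++ numstr.

-- the body of A's 'for d in [0, 1]' loop, appending the surviving children to q
def bfsChildren (N : Int) (numstr : List Char) (num : Int) (q : List (List Char × Int)) :
    List (List Char × Int) :=
  List.foldl (fun acc d =>
    let level := numstr.length
    let new_num := if d = (1 : Int) then (-2 : Int) ^ level + num else num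
    let new_numstr := PySem.Int.toChars d ++ numstr
    if new_num > N then acc else acc ++ [(new_numstr, new_num)]) q [0, 1]

-- A's inner 'while size > 0' loop; Sum.inl = the 'return numstr', Sum.inr = fall through with q
def bfsInner (N : Int) : Nat → List (List Char × Int) → (List Char) ⊕ List (List Char × Int)
  | 0, q => Sum.inr q
  | size + 1, q =>
    match PySem.List.pop? q 0 with
    | none => Sum.inr q        -- guard only: size ≤ len(q) always, Python never pops empty here
    | some ((numstr, num), q') =>
      if num = N then Sum.inl numstr
      else bfsInner N size (bfsChildren N numstr num q')

-- A's outer 'while q' loop; the fuel only makes the recursion total (proven sufficient below)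
def bfsOuter (N : Int) : Nat → List (List Char × Int) → Option String
  | 0, _ => none
  | fuel + 1, q =>
    if q.isEmpty then none
    else
      match bfsInner N q.length q with
      | Sum.inl s => some (String.ofList s)
      | Sum.inr q' => bfsOuter N fuel q'

def bfs (N : Int) : Option String :=
  let q : List (List Char × Int) :=
    if PySem.Int.mod N 2 = 0 then [(['0'], 0)] else [(['1'], 1)]
  bfsOuter N (2 * N.natAbs + 2) q

-- ===== PORT B =====
-- Source B's 'while N != 0' loop, carrying the list of one-char digit strings; the fuel only makes
-- the recursion total (2*|N|+2 exceeds the loop's iteration count, proven below)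
def bfsAltLoop (N : Int) : Nat → Int → List (List Char) → List (List Char)
  | 0, _, digits => digits
  | fuel + 1, n, digits =>
    if n = 0 then digits
    else
      let r := PySem.Int.mod n 2
      bfsAltLoop N fuel (PySem.Int.floordiv (n - r) (-2)) (digits ++ [PySem.Int.toChars r])

def bfs_alt (N : Int) : Option String :=
  if N = 0 then some "0"
  else some (String.ofList (bfsAltLoop N (2 * N.natAbs + 2) N []).reverse.flatten)  -- "".join(reversed(digits))

-- ===== PRECONDITION & SPEC =====
-- Pre_ excludes N ≤ -3, outside the problem's stated domain (LeetCode 1017 guarantees 0 ≤ N):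
-- there A's prune-everything-above-N search empties its queue and returns None even though a
-- base -2 representation exists, while B returns that representation.
def Pre_bfs (N : Int) : Prop := -2 ≤ N
instance (N : Int) : Decidable (Pre_bfs N) := by unfold Pre_bfs; infer_instance
def pvWitness_bfs : Int := (6)

def Spec_bfs (N : Int) (out : Option String) : Prop := out = bfs_alt N
instance (N : Int) (out : Option String) : Decidable (Spec_bfs N out) := by unfold Spec_bfs; infer_instance

-- ===== CLAIM (what is proved, stated in full; the proofs are below) =====
def Claim_equal_bfs : Prop := ∀ (N : Int), Dom_bfs N → Pre_bfs N → Spec_bfs N (bfs N)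

-- ===== LEMMAS AND PROOFS =====

-- the next value of the division loop, and a termination measure for it
def nextB (n : Int) : Int := PySem.Int.floordiv (n - PySem.Int.mod n 2) (-2)

def msr (n : Int) : Nat := 2 * n.natAbs + (if n < 0 then 1 else 0)

theorem mod_two_eq' (n : Int) : PySem.Int.mod n 2 = n % 2 :=
  PySem.Int.mod_eq_emod_of_pos (by norm_num)

theorem nextB_mul (n : Int) : nextB n * (-2) = n - n % 2 := by
  have hd : (-2 : Int) ∣ (n - PySem.Int.mod n 2) := by
    rw [mod_two_eq']; exact neg_dvd.mpr (by omega)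
  have h0 : PySem.Int.mod (n - PySem.Int.mod n 2) (-2) = 0 :=
    (PySem.Int.mod_eq_zero_iff_dvd _ _).2 hd
  have hq := PySem.Int.floordiv_mul_add_mod (n - PySem.Int.mod n 2) (-2)
  rw [h0, add_zero] at hq
  unfold nextB
  rw [hq, mod_two_eq']

theorem nextB_msr_lt (n : Int) (h : n ≠ 0) : msr (nextB n) < msr n := by
  have h1 := nextB_mul n
  unfold msr
  split_ifs at * <;> omega

-- canonical little-endian base -2 digits (fuelled; canon uses always-sufficient fuel)
def canonF : Nat → Int → List Char
  | 0, _ => []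
  | fuel + 1, n =>
    if n = 0 then []
    else (if PySem.Int.mod n 2 = 1 then '1' else '0') :: canonF fuel (nextB n)

def canon (n : Int) : List Char := canonF (2 * n.natAbs + 2) n

def IsDig (cs : List Char) : Prop := ∀ c ∈ cs, c = '0' ∨ c = '1'

theorem msr_lt_fuel (n : Int) : msr n < 2 * n.natAbs + 2 := by
  unfold msr; split_ifs <;> omega

theorem canonF_step (f : Nat) (n : Int) (h : n ≠ 0) :
    canonF (f + 1) n = (if n % 2 = 1 then '1' else '0') :: canonF f (nextB n) := by
  simp [canonF, h]

theorem canonF_irrel (f1 : Nat) : ∀ (f2 : Nat) (n : Int), msr n < f1 → msr n < f2 →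
    canonF f1 n = canonF f2 n := by
  induction f1 with
  | zero => intro f2 n h1 _; omega
  | succ f1 ih =>
    intro f2 n h1 h2
    match f2 with
    | 0 => omega
    | f2 + 1 =>
      by_cases hn : n = 0
      · simp [canonF, hn]
      · have hm := nextB_msr_lt n hn
        rw [canonF_step f1 n hn, canonF_step f2 n hn]
        rw [ih f2 (nextB n) (by omega) (by omega)]

theorem canon_zero : canon 0 = [] := by simp [canon, canonF]

theorem canon_step (n : Int) (h : n ≠ 0) :
    canon n = (if n % 2 = 1 then '1' else '0') :: canon (nextB n) := by
  have h1 : canon n = canonF (2 * n.natAbs + 1 + 1) n := rfl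
  rw [h1, canonF_step _ _ h]
  congr 1
  exact canonF_irrel _ _ _
    (by have := nextB_msr_lt n h; have := msr_lt_fuel n; omega)
    (msr_lt_fuel (nextB n))

-- little-endian base -2 value of a digit string
def bval : List Char → Int
  | [] => 0
  | c :: cs => (if c = '1' then 1 else 0) + (-2) * bval cs

theorem bval_append (a b : List Char) :
    bval (a ++ b) = bval a + (-2 : Int) ^ a.length * bval b := by
  induction a with
  | nil => simp [bval]
  | cons c cs ih => simp [bval, ih, pow_succ]; ring

theorem canonF_val (f : Nat) : ∀ n : Int, msr n < f → bval (canonF f n) = n := by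
  induction f with
  | zero => intro n h; omega
  | succ f ih =>
    intro n h
    by_cases hn : n = 0
    · simp [canonF, hn, bval]
    · have hm := nextB_msr_lt n hn
      rw [canonF_step f n hn]
      have hv := ih (nextB n) (by omega)
      have h1 := nextB_mul n
      rcases (by omega : n % 2 = 0 ∨ n % 2 = 1) with h2 | h2 <;>
        simp [h2, bval, hv] <;> omega

theorem canon_val (n : Int) : bval (canon n) = n := canonF_val _ n (msr_lt_fuel n)

theorem canonF_dig (f : Nat) : ∀ n : Int, IsDig (canonF f n) := by
  induction f with
  | zero => intro n c hc; simp [canonF] at hc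
  | succ f ih =>
    intro n c hc
    by_cases hn : n = 0
    · simp [canonF, hn] at hc
    · rw [canonF_step f n hn] at hc
      rcases List.mem_cons.mp hc with hc | hc
      · subst hc; split_ifs <;> simp
      · exact ih (nextB n) c hc

theorem canon_dig (n : Int) : IsDig (canon n) := canonF_dig _ n

theorem canonF_len (f : Nat) : ∀ n : Int, msr n < f → (canonF f n).length ≤ msr n := by
  induction f with
  | zero => intro n h; omega
  | succ f ih =>
    intro n h
    by_cases hn : n = 0
    · simp [canonF, hn]
    · have hm := nextB_msr_lt n hn
      have hnz : msr n ≠ 0 := by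
        intro h0; rw [h0] at hm; omega
      rw [canonF_step f n hn]
      have := ih (nextB n) (by omega)
      simp only [List.length_cons]
      omega

theorem canon_len (n : Int) : (canon n).length ≤ msr n := canonF_len _ n (msr_lt_fuel n)

theorem bval_unique (cs : List Char) (h : IsDig cs) :
    ∃ k, cs = canon (bval cs) ++ List.replicate k '0' := by
  induction cs with
  | nil => exact ⟨0, by simp [bval, canon_zero]⟩
  | cons c cs ih =>
    have hc : c = '0' ∨ c = '1' := h c (by simp)
    have hdig : IsDig cs := fun x hx => h x (by simp [hx])
    obtain ⟨k, hk⟩ := ih hdig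
    have hbv : bval (c :: cs) = (if c = '1' then 1 else 0) + (-2) * bval cs := rfl
    by_cases hz : bval (c :: cs) = 0
    · have hd0 : ¬ (c = '1') := by
        intro h1; rw [hbv, if_pos h1] at hz; omega
      have hc0 : c = '0' := by
        rcases hc with h0 | h1
        · exact h0
        · exact absurd h1 hd0
      have hv0 : bval cs = 0 := by rw [hbv, if_neg hd0] at hz; omega
      refine ⟨k + 1, ?_⟩
      rw [hz, canon_zero, List.nil_append, hc0]
      rw [hv0, canon_zero, List.nil_append] at hk
      simp [List.replicate_succ, hk]
    · have hstep := canon_step _ hz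
      have hmul := nextB_mul (bval (c :: cs))
      have hdd : (bval (c :: cs)) % 2 = (if c = '1' then 1 else 0) := by
        rw [hbv]; split_ifs <;> omega
      have hnext : nextB (bval (c :: cs)) = bval cs := by
        rw [hdd] at hmul
        rw [hbv] at hmul
        rw [hbv]
        split_ifs at * <;> omega
      refine ⟨k, ?_⟩
      rw [hstep, hnext, hdd]
      have hhead : (if (if c = '1' then (1:Int) else 0) = 1 then '1' else '0') = c := by
        rcases hc with h | h <;> simp [h]
      rw [hhead, List.cons_append, ← hk]

theorem bval_bounds (cs : List Char) (h : IsDig cs) :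
    2 - 2 ^ (cs.length + 1) ≤ 3 * bval cs ∧ 3 * bval cs ≤ 2 ^ (cs.length + 1) - 1 := by
  induction cs with
  | nil => simp [bval]
  | cons c cs ih =>
    have hdig : IsDig cs := fun x hx => h x (by simp [hx])
    obtain ⟨ih1, ih2⟩ := ih hdig
    have hbv : bval (c :: cs) = (if c = '1' then 1 else 0) + (-2) * bval cs := rfl
    have hp : (2:Int) ^ (cs.length + 1 + 1) = 2 * 2 ^ (cs.length + 1) := by ring
    have hlen : (c :: cs).length = cs.length + 1 := rfl
    rw [hlen, hp, hbv]
    split_ifs <;> constructor <;> linarith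

theorem prefix_le (cs : List Char) (h : IsDig cs) (h0 : 0 ≤ bval cs) (k : Nat) :
    bval (cs.take k) ≤ bval cs := by
  have hsplit : cs.take k ++ cs.drop k = cs := List.take_append_drop k cs
  have hval : bval cs = bval (cs.take k) + (-2:Int) ^ (cs.take k).length * bval (cs.drop k) := by
    conv_lhs => rw [← hsplit]
    exact bval_append _ _
  set t := (-2:Int) ^ (cs.take k).length * bval (cs.drop k) with ht
  by_cases hts : 0 ≤ t
  · linarith
  · exfalso
    have htneg : t < 0 := not_le.mp hts
    set m := (cs.take k).length with hm
    have hdvd : (2:Int) ^ m ∣ t := ⟨(-1) ^ m * bval (cs.drop k), by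
      rw [ht]; rw [show ((-2:Int)) ^ m = (-1) ^ m * 2 ^ m by rw [← neg_one_mul, mul_pow]]; ring⟩
    obtain ⟨c, hc⟩ := hdvd
    have hpow : (0:Int) < 2 ^ m := by positivity
    have hcneg : c ≤ -1 := by nlinarith
    have htle : t ≤ -(2 ^ m) := by rw [hc]; nlinarith
    have hdigt : IsDig (cs.take k) := fun x hx => h x (List.mem_of_mem_take hx)
    have hb := (bval_bounds _ hdigt).2
    have hp : (2:Int) ^ (m + 1) = 2 * 2 ^ m := by ring
    rw [← hm, hp] at hb
    linarith

-- surviving children of one queue entry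
def childSet (N : Int) (s : List Char) (v : Int) : List (List Char × Int) :=
  (if v > N then [] else [('0' :: s, v)]) ++
  (if (-2 : Int) ^ s.length + v > N then [] else [('1' :: s, (-2 : Int) ^ s.length + v)])

theorem children_eq (N : Int) (s : List Char) (v : Int) (q : List (List Char × Int)) :
    bfsChildren N s v q = q ++ childSet N s v := by
  have h0 : PySem.Int.toChars 0 = ['0'] := by decide
  have h1 : PySem.Int.toChars 1 = ['1'] := by decide
  simp only [bfsChildren, childSet, List.foldl_cons, List.foldl_nil, h0, h1]
  norm_num
  split_ifs <;> simp

theorem inner_run (N : Int) (p : List (List Char × Int)) :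
    ∀ r, (∀ e ∈ p, e.2 ≠ N) →
    bfsInner N p.length (p ++ r) = Sum.inr (r ++ p.flatMap (fun e => childSet N e.1 e.2)) := by
  induction p with
  | nil => intro r _; simp [bfsInner]
  | cons e p ih =>
    intro r h
    obtain ⟨s, v⟩ := e
    have hv : v ≠ N := h (s, v) (by simp)
    simp only [List.length_cons, List.cons_append, bfsInner, PySem.List.pop?_zero_cons, hv,
      if_false]
    rw [children_eq]
    rw [show p ++ r ++ childSet N s v = p ++ (r ++ childSet N s v) by simp]
    rw [ih (r ++ childSet N s v) (fun e he => h e (by simp [he]))]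
    simp

theorem inner_found (N : Int) (p : List (List Char × Int)) (t : List Char) :
    ∀ r, (∀ e ∈ p, e.2 = N → e.1 = t) → (∃ e ∈ p, e.2 = N) →
    bfsInner N p.length (p ++ r) = Sum.inl t := by
  induction p with
  | nil => intro r _ h2; simp at h2
  | cons e p ih =>
    intro r h1 h2
    obtain ⟨s, v⟩ := e
    by_cases hv : v = N
    · have hs : s = t := h1 (s, v) (by simp) hv
      simp [bfsInner, hv, hs]
    · simp only [List.length_cons, List.cons_append, bfsInner, PySem.List.pop?_zero_cons, hv,
        if_false]
      rw [children_eq]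
      rw [show p ++ r ++ childSet N s v = p ++ (r ++ childSet N s v) by simp]
      apply ih _ (fun e he hev => h1 e (by simp [he]) hev)
      rcases h2 with ⟨e', he', hev⟩
      rcases List.mem_cons.mp he' with he' | he'
      · exfalso; rw [he'] at hev; exact hv hev
      · exact ⟨e', he', hev⟩

theorem inner_run' (N : Int) (p : List (List Char × Int)) (h : ∀ e ∈ p, e.2 ≠ N) :
    bfsInner N p.length p = Sum.inr (p.flatMap (fun e => childSet N e.1 e.2)) := by
  have := inner_run N p [] h
  simpa using this

theorem inner_found' (N : Int) (p : List (List Char × Int)) (t : List Char)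
    (h1 : ∀ e ∈ p, e.2 = N → e.1 = t) (h2 : ∃ e ∈ p, e.2 = N) :
    bfsInner N p.length p = Sum.inl t := by
  have := inner_found N p t [] h1 h2
  simpa using this

def QInv (N : Int) (k : Nat) (q : List (List Char × Int)) : Prop :=
  (∀ e ∈ q, IsDig e.1 ∧ e.1.length = k ∧ e.2 = bval e.1.reverse ∧ e.2 ≤ N) ∧
  (((canon N).take k).reverse, bval ((canon N).take k)) ∈ q

theorem entry_at_N (N : Int) (k : Nat) (q : List (List Char × Int)) (inv : QInv N k q)
    (hkle : k ≤ (canon N).length)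
    (e : List Char × Int) (he : e ∈ q) (hev : e.2 = N) :
    e.1 = (canon N).reverse ∧ k = (canon N).length := by
  obtain ⟨hd, hlen, hval, _⟩ := inv.1 e he
  have hdigrev : IsDig e.1.reverse := fun c hc => hd c (List.mem_reverse.mp hc)
  obtain ⟨j, hj⟩ := bval_unique e.1.reverse hdigrev
  rw [← hval, hev] at hj
  have hlj : k = (canon N).length + j := by
    have hlenj := congrArg List.length hj
    simp at hlenj
    omega
  have hj0 : j = 0 := by omega
  subst hj0
  simp at hj
  constructor
  · rw [← List.reverse_reverse e.1, hj]
  · omega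

theorem outer_run (N : Int) (hN : 1 ≤ N) :
    ∀ fuel k q, 1 ≤ k → k ≤ (canon N).length → (canon N).length - k < fuel → QInv N k q →
      bfsOuter N fuel q = some (String.ofList (canon N).reverse) := by
  intro fuel
  induction fuel with
  | zero => intro k q _ _ h _; omega
  | succ fuel ih =>
    intro k q hk1 hkL hfuel inv
    have hqne : q ≠ [] := List.ne_nil_of_mem inv.2
    have hie : q.isEmpty = false := by
      cases q with
      | nil => exact absurd rfl hqne
      | cons a l => rfl
    by_cases hkeq : k = (canon N).length
    · have hfound := inner_found' N q (canon N).reverse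
        (fun e he hev => (entry_at_N N k q inv hkL e he hev).1)
        ⟨(((canon N).take k).reverse, bval ((canon N).take k)), inv.2, by
          show bval ((canon N).take k) = N
          rw [hkeq, List.take_length, canon_val]⟩
      simp [bfsOuter, hie, hfound]
    · have hklt : k < (canon N).length := by omega
      have hnone : ∀ e ∈ q, e.2 ≠ N := by
        intro e he hev
        exact hkeq (entry_at_N N k q inv hkL e he hev).2
      have hrun := inner_run' N q hnone
      simp only [bfsOuter, hie, Bool.false_eq_true, if_false, hrun]
      apply ih (k + 1) _ (by omega) (by omega) (by omega)
      constructor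
      · intro e' he'
        obtain ⟨e, he, hc⟩ := List.mem_flatMap.mp he'
        obtain ⟨hd, hlen, hval, hle⟩ := inv.1 e he
        change e' ∈ childSet N e.1 e.2 at hc
        unfold childSet at hc
        rcases List.mem_append.mp hc with hc | hc
        · by_cases hp : e.2 > N
          · simp [hp] at hc
          · simp only [hp, if_false, List.mem_singleton] at hc
            subst hc
            refine ⟨?_, by simp [hlen], ?_, by omega⟩
            · intro c hcm
              rcases List.mem_cons.mp hcm with hcm | hcm
              · exact Or.inl hcm
              · exact hd c hcm
            · show e.2 = bval (('0' :: e.1).reverse)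
              rw [List.reverse_cons, bval_append]
              have hb0 : bval ['0'] = 0 := by simp [bval]
              rw [hb0, hval]
              ring
        · by_cases hp : (-2 : Int) ^ e.1.length + e.2 > N
          · simp [hp] at hc
          · simp only [hp, if_false, List.mem_singleton] at hc
            subst hc
            refine ⟨?_, by simp [hlen], ?_, by omega⟩
            · intro c hcm
              rcases List.mem_cons.mp hcm with hcm | hcm
              · exact Or.inr hcm
              · exact hd c hcm
            · show (-2 : Int) ^ e.1.length + e.2 = bval (('1' :: e.1).reverse)
              rw [List.reverse_cons, bval_append]
              have hb1 : bval ['1'] = 1 := by simp [bval]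
              rw [hb1, hval, List.length_reverse, hlen]
              ring
      · -- the canonical prefix of length k+1 is a surviving child of the one of length k
        have htk : (canon N).take (k + 1) = (canon N).take k ++ [(canon N)[k]] := by
          rw [List.take_add_one, List.getElem?_eq_getElem hklt]
          rfl
        have hlentk : ((canon N).take k).length = k := by
          simp [List.length_take, le_of_lt hklt]
        have hbk : bval ((canon N).take (k + 1))
            = bval ((canon N).take k) + (-2:Int) ^ k * bval [(canon N)[k]] := by
          rw [htk, bval_append, hlentk]
        have hle1 : bval ((canon N).take (k + 1)) ≤ N := by
          have := prefix_le (canon N) (canon_dig N) (by rw [canon_val]; omega) (k + 1)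
          rwa [canon_val] at this
        have hpk2leN : bval ((canon N).take k) ≤ N := (inv.1 _ inv.2).2.2.2
        rw [List.mem_flatMap]
        refine ⟨(((canon N).take k).reverse, bval ((canon N).take k)), inv.2, ?_⟩
        show ((List.take (k + 1) (canon N)).reverse, bval (List.take (k + 1) (canon N)))
          ∈ childSet N (((canon N).take k).reverse) (bval ((canon N).take k))
        unfold childSet
        have hlpk : (((canon N).take k).reverse).length = k := by
          simp [hlentk]
        rcases canon_dig N ((canon N)[k]) (List.getElem_mem _) with h0 | h1
        · have hb0 : bval [(canon N)[k]] = 0 := by rw [h0]; simp [bval]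
          have hsame : bval ((canon N).take (k + 1)) = bval ((canon N).take k) := by
            rw [hbk, hb0]; ring
          rw [List.mem_append]
          left
          rw [if_neg (by omega)]
          rw [List.mem_singleton, Prod.mk.injEq]
          constructor
          · rw [htk, h0, List.reverse_append]
            rfl
          · exact hsame
        · have hb1 : bval [(canon N)[k]] = 1 := by rw [h1]; simp [bval]
          have hsame : bval ((canon N).take (k + 1))
              = (-2:Int) ^ k + bval ((canon N).take k) := by
            rw [hbk, hb1]; ring
          rw [List.mem_append]
          right
          rw [hlpk]
          rw [if_neg (by intro hgt; rw [hsame] at hle1; exact absurd hle1 (not_le.mpr hgt))]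
          rw [List.mem_singleton, Prod.mk.injEq]
          constructor
          · rw [htk, h1, List.reverse_append]
            rfl
          · exact hsame

theorem altLoop_eq (N : Int) (f : Nat) : ∀ (n : Int) (ds : List (List Char)), msr n < f →
    bfsAltLoop N f n ds = ds ++ (canon n).map (fun c => [c]) := by
  induction f with
  | zero => intro n ds h; omega
  | succ f ih =>
    intro n ds h
    by_cases hn : n = 0
    · simp [bfsAltLoop, hn, canon_zero]
    · have hm := nextB_msr_lt n hn
      simp only [bfsAltLoop, hn, if_false]
      rw [show PySem.Int.floordiv (n - PySem.Int.mod n 2) (-2) = nextB n from rfl]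
      rw [ih (nextB n) _ (by omega)]
      rw [canon_step n hn]
      have h2 : n % 2 = 0 ∨ n % 2 = 1 := by omega
      rcases h2 with h2 | h2 <;>
        simp [h2, show PySem.Int.toChars 0 = ['0'] from by decide,
          show PySem.Int.toChars 1 = ['1'] from by decide]

theorem alt_eq_canon (N : Int) (h : N ≠ 0) :
    bfs_alt N = some (String.ofList (canon N).reverse) := by
  unfold bfs_alt
  rw [if_neg h]
  rw [altLoop_eq N _ N [] (msr_lt_fuel N)]
  congr 2
  rw [List.nil_append, ← List.map_reverse]
  induction ((canon N).reverse) with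
  | nil => simp
  | cons c cs ih => simp [ih]

theorem bfs_eq_pos (N : Int) (hN : 1 ≤ N) : bfs N = bfs_alt N := by
  have hNne : N ≠ 0 := by omega
  rw [alt_eq_canon N hNne]
  have hcs := canon_step N hNne
  have hLpos : 1 ≤ (canon N).length := by
    rw [hcs]; simp
  have hfuel : (canon N).length - 1 < 2 * N.natAbs + 2 := by
    have h1 := canon_len N
    unfold msr at h1
    split_ifs at h1 <;> omega
  show bfsOuter N (2 * N.natAbs + 2)
      (if PySem.Int.mod N 2 = 0 then [(['0'], 0)] else [(['1'], 1)])
    = some (String.ofList (canon N).reverse)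
  have htake : (canon N).take 1 = [(if N % 2 = 1 then '1' else '0')] := by
    rw [hcs]; rfl
  rcases (by omega : N % 2 = 0 ∨ N % 2 = 1) with hm | hm
  · rw [mod_two_eq', if_pos hm]
    apply outer_run N hN _ 1 _ le_rfl hLpos hfuel
    constructor
    · intro e he
      rw [List.mem_singleton] at he
      subst he
      exact ⟨fun c hc => by simp at hc; simp [hc], rfl, by simp [bval], by omega⟩
    · rw [htake, hm]
      simp [bval]
  · rw [mod_two_eq', if_neg (by omega)]
    apply outer_run N hN _ 1 _ le_rfl hLpos hfuel
    constructor
    · intro e he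
      rw [List.mem_singleton] at he
      subst he
      exact ⟨fun c hc => by simp at hc; simp [hc], rfl, by simp [bval], by omega⟩
    · rw [htake, hm]
      simp [bval]

-- ===== VERDICT (by name: the statement is the Claim_ definition above) =====
theorem bfs_spec : Claim_equal_bfs := by
  intro N _ hpre
  unfold Spec_bfs
  by_cases h1 : 1 ≤ N
  · exact bfs_eq_pos N h1
  · have : N = -2 ∨ N = -1 ∨ N = 0 := by unfold Pre_bfs at hpre; omega
    rcases this with h | h | h <;> subst h <;> decide
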